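-- pv_equiv track=rewrite | github.com/MelissaOfficina/advent-of-code-2021 | day3.py | actual_count
-- ===== SOURCE A (Python) =====
-- def actual_count(items):
--     counter_ = {}
--     for item in items:
--         for key, num in enumerate(item.strip("\n")):
--             if key not in counter_:
--                 counter_[key] = {"0": 0, "1": 0}
--             counter_[key][num] += 1
--     return counter_
-- ===== SOURCE B (Python) =====
-- def actual_count(items):
--     # Column-major re-implementation: strip once, compute the max width,
--     # then count each column with one pass per position.
--     stripped = [item.strip("\n") for item in items]
--     width = 0
--     for s in stripped:
--         width = max(width, len(s))
--     counter_ = {}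
--     for key in range(width):
--         counts = {"0": 0, "1": 0}
--         for s in stripped:
--             if key < len(s):
--                 counts[s[key]] += 1
--         counter_[key] = counts
--     return counter_
-- ===== Notes on version B (the rewrite author's own statement) =====
-- stated objective: alternative
-- what changed: B strips each item once, computes the maximum width, and counts column-major (one pass over the stripped items per bit position, each position's dict built independently) instead of A's item-major loop that grows a dict-of-dicts via membership tests.
import Mathlib
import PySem

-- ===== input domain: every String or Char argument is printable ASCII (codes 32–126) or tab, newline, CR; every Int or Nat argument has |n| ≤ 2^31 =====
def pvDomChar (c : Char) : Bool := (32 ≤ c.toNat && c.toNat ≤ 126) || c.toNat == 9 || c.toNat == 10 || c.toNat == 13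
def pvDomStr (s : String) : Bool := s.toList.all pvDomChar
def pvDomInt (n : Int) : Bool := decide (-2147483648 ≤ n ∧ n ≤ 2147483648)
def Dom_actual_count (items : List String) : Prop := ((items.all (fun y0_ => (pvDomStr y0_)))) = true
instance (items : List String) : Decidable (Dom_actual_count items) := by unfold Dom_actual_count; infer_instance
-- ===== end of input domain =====

-- B counts column-major (strip once, max width, one pass per bit position) instead of A's
-- item-major dict-of-dicts growth; equivalence is proved on inputs of only '0'/'1' characters.

-- ===== PORT A =====
-- 'counter_[key][num] += 1' raises KeyError when num is not a key of the inner dict;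
-- the Dict.modify-with-default port is exact only under Pre_ (chars are '0'/'1', always present).
def actual_count (items : List String) : List (Int × List (String × Int)) :=
  let counter :=
    items.foldl (fun d item =>
      (PySem.List.enumerate (PySem.Str.stripChars item "\n").toList 0).foldl
        (fun d kn =>
          let d := if d.contains kn.1 then d
                   else d.insert kn.1 (PySem.Dict.ofList [("0", (0 : Int)), ("1", 0)])
          d.modify kn.1 (PySem.Dict.ofList [("0", (0 : Int)), ("1", 0)])
            (fun inner => inner.modify (String.ofList [kn.2]) 0 (· + 1))) d)
      PySem.Dict.empty
  counter.items.map (fun p => (p.1, p.2.items))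

-- ===== PORT B =====
-- 'counts[s[key]] += 1' raises KeyError when the char is not '0'/'1'; the Dict.modify port
-- is exact only under Pre_, same as A's.
def actual_count_alt (items : List String) : List (Int × List (String × Int)) :=
  let stripped := items.map (fun item => (PySem.Str.stripChars item "\n").toList)
  let width : Int := stripped.foldl (fun m r => max m (r.length : Int)) 0
  (PySem.List.pyRange 0 width 1).map (fun key =>
    (key,
      (stripped.foldl
        (fun (counts : PySem.Dict String Int) r =>
          if key < (r.length : Int) then
            counts.modify (String.ofList [PySem.List.pyGetD r key ' ']) 0 (· + 1)
          else counts)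
        (PySem.Dict.ofList [("0", (0 : Int)), ("1", 0)])).items))

-- ===== PRECONDITION & SPEC =====
-- Pre_ excludes exactly the inputs on which the Python A raises KeyError: some character of a
-- stripped item is neither '0' nor '1' (B's Python raises KeyError there too).
def Pre_actual_count (items : List String) : Prop :=
  (items.all (fun s =>
    (PySem.Str.stripChars s "\n").toList.all (fun c => c == '0' || c == '1'))) = true
instance (items : List String) : Decidable (Pre_actual_count items) := by
  unfold Pre_actual_count; infer_instance
def pvWitness_actual_count : List String := ["01\n", "10", "0"]

def Spec_actual_count (items : List String) (out : List (Int × List (String × Int))) : Prop :=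
  out = actual_count_alt items
instance (items : List String) (out : List (Int × List (String × Int))) :
    Decidable (Spec_actual_count items out) := by unfold Spec_actual_count; infer_instance

-- ===== CLAIM (what is proved, stated in full; the proofs are below) =====
def Claim_equal_actual_count : Prop :=
  ∀ (items : List String), Dom_actual_count items → Pre_actual_count items →
    Spec_actual_count items (actual_count items)

-- ===== LEMMAS AND PROOFS =====

def pvInit : PySem.Dict String Int := PySem.Dict.ofList [("0", (0 : Int)), ("1", 0)]

def pvStepA (d : PySem.Dict Int (PySem.Dict String Int)) (kn : Int × Char) :
    PySem.Dict Int (PySem.Dict String Int) :=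
  let d := if d.contains kn.1 then d else d.insert kn.1 pvInit
  d.modify kn.1 pvInit (fun inner => inner.modify (String.ofList [kn.2]) 0 (· + 1))

def pvRowA (d : PySem.Dict Int (PySem.Dict String Int)) (r : List Char) :
    PySem.Dict Int (PySem.Dict String Int) :=
  (PySem.List.enumerate r 0).foldl pvStepA d

def pvColStep (k : Int) (c : PySem.Dict String Int) (r : List Char) : PySem.Dict String Int :=
  if k < (r.length : Int) then c.modify (String.ofList [PySem.List.pyGetD r k ' ']) 0 (· + 1) else c

lemma pv_bridgeA (items : List String) :
    actual_count items =
      ((items.map (fun item => (PySem.Str.stripChars item "\n").toList)).foldl pvRowA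
        PySem.Dict.empty).items.map (fun p => (p.1, p.2.items)) := by
  simp only [actual_count, pvRowA, List.foldl_map]
  rfl

lemma pv_getD_stepA (d : PySem.Dict Int (PySem.Dict String Int)) (kn : Int × Char) (j : Int) :
    (pvStepA d kn).getD j pvInit =
      if j = kn.1 then (d.getD kn.1 pvInit).modify (String.ofList [kn.2]) 0 (· + 1)
      else d.getD j pvInit := by
  by_cases hc : d.contains kn.1 = true
  · simp [pvStepA, hc, PySem.Dict.getD_modify]
  · have h0 : d.getD kn.1 pvInit = pvInit :=
      PySem.Dict.getD_of_not_contains d pvInit ((Bool.not_eq_true _).mp hc)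
    simp [pvStepA, hc, PySem.Dict.getD_modify, PySem.Dict.getD_insert, h0]
    split_ifs <;> rfl

lemma pv_keys_stepA (d : PySem.Dict Int (PySem.Dict String Int)) (kn : Int × Char) :
    (pvStepA d kn).keys = if d.contains kn.1 then d.keys else d.keys ++ [kn.1] := by
  by_cases hc : d.contains kn.1 = true
  · simp only [pvStepA, hc, if_true, PySem.Dict.keys_modify,
      PySem.Dict.keys_insert_of_contains d _ hc]
  · simp only [pvStepA, hc, Bool.false_eq_true, if_false, PySem.Dict.keys_modify,
      PySem.Dict.insert_insert_self]
    rw [PySem.Dict.keys_insert_of_not_contains d _ ((Bool.not_eq_true _).mp hc)]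

lemma pv_rowA_append (d : PySem.Dict Int (PySem.Dict String Int)) (r' : List Char) (c : Char) :
    pvRowA d (r' ++ [c]) = pvStepA (pvRowA d r') ((r'.length : Int), c) := by
  simp [pvRowA, PySem.List.enumerate_append, PySem.List.enumerate_cons,
    PySem.List.enumerate_nil]

lemma pv_keys_rowA (r : List Char) (w : Int) (hw : 0 ≤ w)
    (d : PySem.Dict Int (PySem.Dict String Int))
    (hk : d.keys = PySem.List.pyRange 0 w 1) :
    (pvRowA d r).keys = PySem.List.pyRange 0 (max w (r.length : Int)) 1 := by
  induction r using List.reverseRecOn with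
  | nil => simpa [pvRowA, PySem.List.enumerate_nil, max_eq_left hw] using hk
  | append_singleton r' c ih =>
      rw [pv_rowA_append, pv_keys_stepA, PySem.Dict.contains_eq_decide_mem_keys, ih]
      rcases lt_or_ge (r'.length : Int) w with hlt | hge
      · have hmax : max w ((r'.length : Int)) = w := max_eq_left hlt.le
        have hmax' : max w (((r' ++ [c]).length : Int)) = w := by
          simp only [List.length_append, List.length_cons, List.length_nil]
          push_cast; omega
        rw [hmax, hmax', if_pos (by simp [PySem.List.mem_pyRange_one]; omega)]
      · have hmax : max w ((r'.length : Int)) = (r'.length : Int) := max_eq_right hge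
        have hmax' : max w (((r' ++ [c]).length : Int)) = (r'.length : Int) + 1 := by
          simp only [List.length_append, List.length_cons, List.length_nil]
          push_cast; omega
        rw [hmax, hmax', if_neg (by simp [PySem.List.mem_pyRange_one]),
          ← PySem.List.pyRange_one_succ_right (by positivity)]

lemma pv_getD_rowA (r : List Char) (d : PySem.Dict Int (PySem.Dict String Int)) (k : Int)
    (hk : 0 ≤ k) :
    (pvRowA d r).getD k pvInit = pvColStep k (d.getD k pvInit) r := by
  induction r using List.reverseRecOn with
  | nil =>
      simp only [pvRowA, PySem.List.enumerate_nil, List.foldl_nil, pvColStep]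
      rw [if_neg (by simp; omega)]
  | append_singleton r' c ih =>
      rw [pv_rowA_append, pv_getD_stepA]
      by_cases hke : k = (r'.length : Int)
      · subst hke
        rw [if_pos rfl]
        rw [pvColStep, if_neg (by omega)] at ih
        rw [ih]
        simp only [pvColStep, List.length_append, List.length_cons, List.length_nil]
        rw [if_pos (by push_cast; omega), PySem.List.pyGetD_natCast,
          List.getD_append_right r' [c] ' ' r'.length le_rfl]
        simp
      · rw [if_neg hke, ih]
        simp only [pvColStep, List.length_append, List.length_cons, List.length_nil]
        rcases lt_or_ge k ((r'.length : Int)) with hlt | hge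
        · rw [if_pos hlt, if_pos (by push_cast; omega)]
          have hk' : k = ((k.toNat : Nat) : Int) := (Int.toNat_of_nonneg hk).symm
          rw [hk', PySem.List.pyGetD_natCast, PySem.List.pyGetD_natCast,
            List.getD_append r' [c] ' ' k.toNat (by omega)]
        · rw [if_neg (by omega), if_neg (by push_cast; omega)]

lemma pv_main (rows : List (List Char)) (d : PySem.Dict Int (PySem.Dict String Int)) (w : Int)
    (hw : 0 ≤ w) (hk : d.keys = PySem.List.pyRange 0 w 1) :
    (rows.foldl pvRowA d).keys =
        PySem.List.pyRange 0 (rows.foldl (fun m r => max m (r.length : Int)) w) 1 ∧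
      ∀ k : Int, 0 ≤ k →
        (rows.foldl pvRowA d).getD k pvInit = rows.foldl (pvColStep k) (d.getD k pvInit) := by
  induction rows generalizing d w with
  | nil => exact ⟨hk, fun k _ => rfl⟩
  | cons r rows ih =>
      have h1 := pv_keys_rowA r w hw d hk
      obtain ⟨ha, hb⟩ := ih (pvRowA d r) (max w (r.length : Int)) (le_max_of_le_left hw) h1
      refine ⟨ha, fun k hk0 => ?_⟩
      rw [List.foldl_cons, List.foldl_cons, hb k hk0, pv_getD_rowA r d k hk0]

-- ===== VERDICT (by name: the statement is the Claim_ definition above) =====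
theorem actual_count_spec : Claim_equal_actual_count := by
  intro items _ _
  unfold Spec_actual_count
  rw [pv_bridgeA]
  obtain ⟨hkeys, hgetD⟩ :=
    pv_main (items.map (fun item => (PySem.Str.stripChars item "\n").toList))
      PySem.Dict.empty 0 le_rfl
      (by rw [PySem.Dict.keys_empty, PySem.List.pyRange_one_eq_nil le_rfl])
  rw [PySem.Dict.items_eq_map_keys _ (by rw [hkeys]; exact PySem.List.nodup_pyRange_one _ _) pvInit,
    hkeys, List.map_map]
  unfold actual_count_alt
  refine List.map_congr_left (fun k hkmem => ?_)
  have hk0 : 0 ≤ k := ((PySem.List.mem_pyRange_one.mp hkmem).1)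
  simp only [Function.comp]
  rw [hgetD k hk0, PySem.Dict.getD_empty]
  rfl
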